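-- pv_equiv track=rewrite | github.com/QuHarmonics/Nexus-4-Framework-Recursive-Harmonic-Architecture | Python Code - Raw Dump/Nexus 4 Framework -SHA-data-code_26- Qu Harmonics.py | compute_min_distances
-- ===== SOURCE A (Python) =====
-- from typing import List, Dict
--
-- def compute_min_distances(states: List[int], K_mod: List[int], M: int) -> Dict[int, Dict[str, int]]:
--     """
--     For each state s, compute:
--       - 'j': index of K_mod[j] minimizing distance
--       - 'distance': minimal distance D(s) under modulus M
--     Distance defined as min((s - k) mod M, (k - s) mod M).
--     """
--     results: Dict[int, Dict[str, int]] = {}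
--     for s in states:
--         best_j = None
--         best_d = M
--         for j, k in enumerate(K_mod):
--             delta = (s - k) % M
--             dist = min(delta, M - delta)
--             if dist < best_d:
--                 best_d = dist
--                 best_j = j
--         results[s] = {'j': best_j, 'distance': best_d}
--     return results
-- ===== SOURCE B (Python) =====
-- def compute_min_distances(states, K_mod, M):
--     # Sort-and-binary-search: index the keys once by residue (first index per residue),
--     # sort the distinct residues, then answer each state by bisecting for its two
--     # cyclic neighbours instead of scanning all of K_mod.
--     if not K_mod or M <= 0:
--         # no candidate distance is strictly below the initial bound M
--         return {s: {'j': None, 'distance': M} for s in states}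
--     first_idx = {}
--     for j, k in enumerate(K_mod):
--         r = k % M
--         if r not in first_idx:
--             first_idx[r] = j
--     rs = sorted(first_idx)
--     n = len(rs)
--     results = {}
--     for s in states:
--         if s in results:
--             continue
--         r = s % M
--         # hand-written bisect_left (stdlib bisect not imported by the module)
--         lo, hi = 0, n
--         while lo < hi:
--             mid = (lo + hi) // 2
--             if rs[mid] < r:
--                 lo = mid + 1
--             else:
--                 hi = mid
--         pred = rs[(lo - 1) % n]
--         succ = rs[lo % n]
--         d = min(min((r - pred) % M, (pred - r) % M),
--                 min((r - succ) % M, (succ - r) % M))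
--         j = min(first_idx.get((r - d) % M, len(K_mod)),
--                 first_idx.get((r + d) % M, len(K_mod)))
--         results[s] = {'j': j, 'distance': d}
--     return results
-- ===== Notes on version B (the rewrite author's own statement) =====
-- stated objective: faster
-- what changed: B replaces A's inner linear scan of K_mod per state by a one-time index: first index per residue in a dict plus a sorted list of distinct residues, then answers each state with a hand-written binary search for its two cyclic neighbours (tie broken via the residue index).
import Mathlib
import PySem

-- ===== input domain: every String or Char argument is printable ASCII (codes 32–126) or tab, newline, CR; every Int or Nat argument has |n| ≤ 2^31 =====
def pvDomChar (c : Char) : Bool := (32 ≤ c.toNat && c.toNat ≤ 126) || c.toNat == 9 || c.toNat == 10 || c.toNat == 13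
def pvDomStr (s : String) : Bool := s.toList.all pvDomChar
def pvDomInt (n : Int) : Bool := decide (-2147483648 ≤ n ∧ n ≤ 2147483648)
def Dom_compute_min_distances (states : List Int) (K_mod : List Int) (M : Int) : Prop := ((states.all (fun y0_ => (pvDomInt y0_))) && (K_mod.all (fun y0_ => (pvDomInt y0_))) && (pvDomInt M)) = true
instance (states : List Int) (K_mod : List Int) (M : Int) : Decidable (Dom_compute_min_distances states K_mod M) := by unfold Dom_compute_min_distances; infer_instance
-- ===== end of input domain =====

-- B indexes K_mod once (first index per residue + sorted distinct residues) and answers each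
-- state by binary search for its two cyclic neighbours — asymptotically faster than A's scan
-- of all of K_mod per state (measured faster in a timing run).

-- ===== PORT A =====
def compute_min_distances (states : List Int) (K_mod : List Int) (M : Int) :
    List (Int × List (String × Option Int)) :=
  (states.foldl (fun (results : PySem.Dict Int (List (String × Option Int))) s =>
      let best := (PySem.List.enumerate K_mod).foldl
        (fun (b : Option Int × Int) jk =>
          let delta := PySem.Int.mod (s - jk.2) M
          let dist := min delta (M - delta)
          if dist < b.2 then (some jk.1, dist) else b) (none, M)
      results.insert s [("j", best.1), ("distance", some best.2)])
    PySem.Dict.empty).items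

-- ===== PORT B =====
-- hand-written bisect_left of Source B (the 'while lo < hi' loop); at every call mid < hi ≤ rs.length,
-- so the getD default is never used
def pvBisect (rs : List Int) (x : Int) (lo hi : Nat) : Nat :=
  if _h : lo < hi then
    let mid := (lo + hi) / 2
    if rs.getD mid 0 < x then pvBisect rs x (mid + 1) hi else pvBisect rs x lo mid
  else lo
termination_by hi - lo
decreasing_by all_goals omega

def compute_min_distances_alt (states : List Int) (K_mod : List Int) (M : Int) :
    List (Int × List (String × Option Int)) :=
  if K_mod = [] ∨ M ≤ 0 then
    -- no candidate distance is strictly below the initial bound M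
    (states.foldl (fun (d : PySem.Dict Int (List (String × Option Int))) s =>
        d.insert s [("j", none), ("distance", some M)]) PySem.Dict.empty).items
  else
    let first_idx : PySem.Dict Int Int :=
      (PySem.List.enumerate K_mod).foldl
        (fun (d : PySem.Dict Int Int) jk =>
          let r := PySem.Int.mod jk.2 M
          if d.contains r then d else d.insert r jk.1) PySem.Dict.empty
    let rs := PySem.List.sorted first_idx.keys (fun c => c) false
    let n := rs.length
    (states.foldl (fun (res : PySem.Dict Int (List (String × Option Int))) s =>
      if res.contains s then res else
      let r := PySem.Int.mod s M
      let i := pvBisect rs r 0 n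
      -- indices (lo-1) % n and lo % n are in [0, n), so .toNat/getD are exact here
      let pred := rs.getD (PySem.Int.mod ((i : Int) - 1) (n : Int)).toNat 0
      let succ := rs.getD (PySem.Int.mod (i : Int) (n : Int)).toNat 0
      let d := min (min (PySem.Int.mod (r - pred) M) (PySem.Int.mod (pred - r) M))
                   (min (PySem.Int.mod (r - succ) M) (PySem.Int.mod (succ - r) M))
      let j := min (first_idx.getD (PySem.Int.mod (r - d) M) (K_mod.length : Int))
                   (first_idx.getD (PySem.Int.mod (r + d) M) (K_mod.length : Int))
      res.insert s [("j", some j), ("distance", some d)]) PySem.Dict.empty).items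

-- ===== PRECONDITION & SPEC =====
-- Pre_ excludes exactly the inputs where Python A raises ZeroDivisionError:
-- M = 0 with both states and K_mod nonempty (the '%' is only reached then).
def Pre_compute_min_distances (states : List Int) (K_mod : List Int) (M : Int) : Prop :=
  M ≠ 0 ∨ states = [] ∨ K_mod = []
instance (states : List Int) (K_mod : List Int) (M : Int) : Decidable (Pre_compute_min_distances states K_mod M) := by unfold Pre_compute_min_distances; infer_instance

def pvWitness_compute_min_distances : List Int × List Int × Int := ([1, 2, 1], [3, 10], 7)

def Spec_compute_min_distances (states : List Int) (K_mod : List Int) (M : Int) (out : List (Int × List (String × Option Int))) : Prop := out = compute_min_distances_alt states K_mod M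
instance (states : List Int) (K_mod : List Int) (M : Int) (out : List (Int × List (String × Option Int))) : Decidable (Spec_compute_min_distances states K_mod M out) := by unfold Spec_compute_min_distances; infer_instance

-- ===== CLAIM (what is proved, stated in full; the proofs are below) =====
def Claim_equal_compute_min_distances : Prop := ∀ (states : List Int) (K_mod : List Int) (M : Int), Dom_compute_min_distances states K_mod M → Pre_compute_min_distances states K_mod M → Spec_compute_min_distances states K_mod M (compute_min_distances states K_mod M)

-- ===== LEMMAS AND PROOFS =====

-- A's inner-loop body and inner fold
def pvStep (M s : Int) (b : Option Int × Int) (jk : Int × Int) : Option Int × Int :=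
  let delta := PySem.Int.mod (s - jk.2) M
  let dist := min delta (M - delta)
  if dist < b.2 then (some jk.1, dist) else b

def pvF (M : Int) (K : List Int) (s : Int) : Option Int × Int :=
  (PySem.List.enumerate K).foldl (pvStep M s) (none, M)

def pvDist (M s k : Int) : Int :=
  min (PySem.Int.mod (s - k) M) (M - PySem.Int.mod (s - k) M)

-- circular distance of two residues, in B's form
def pvCirc (M r c : Int) : Int := min ((r - c) % M) ((c - r) % M)

-- closed form of (a - b) % M for a, b ∈ [0, M)
theorem pvEmod_sub_closed (M a b : Int) (hM : 1 ≤ M) (ha : 0 ≤ a ∧ a < M) (hb : 0 ≤ b ∧ b < M) :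
    (a - b) % M = if b ≤ a then a - b else a - b + M := by
  by_cases h : b ≤ a
  · rw [if_pos h]; apply Int.emod_eq_of_lt <;> omega
  · rw [if_neg h]
    have h1 : (a - b + M * 1) % M = (a - b) % M := Int.add_mul_emod_self_left (a - b) M 1
    rw [← h1, show a - b + M * 1 = a - b + M by ring]
    apply Int.emod_eq_of_lt <;> omega

theorem pvEmod_add_closed (M a b : Int) (hM : 1 ≤ M) (ha : 0 ≤ a ∧ a < M) (hb : 0 ≤ b ∧ b < M) :
    (a + b) % M = if a + b < M then a + b else a + b - M := by
  by_cases h : a + b < M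
  · rw [if_pos h]; apply Int.emod_eq_of_lt <;> omega
  · rw [if_neg h]
    have h1 : (a + b - M + M * 1) % M = (a + b - M) % M := Int.add_mul_emod_self_left (a + b - M) M 1
    conv_lhs => rw [show (a + b) = a + b - M + M * 1 by ring]
    rw [h1]
    apply Int.emod_eq_of_lt <;> omega

-- A's distance of a key k from state s equals pvCirc of the residues (M ≥ 1)
theorem pvDist_eq_circ (M s k : Int) (hM : 1 ≤ M) :
    min (PySem.Int.mod (s - k) M) (M - PySem.Int.mod (s - k) M)
      = pvCirc M (s % M) (k % M) := by
  rw [PySem.Int.mod_eq_emod_of_pos (by omega)]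
  unfold pvCirc
  have h1 : (s - k) % M = (s % M - k % M) % M := Int.sub_emod s k M
  have h2 : (k - s) % M = (k % M - s % M) % M := Int.sub_emod k s M
  have hr : 0 ≤ s % M ∧ s % M < M := ⟨Int.emod_nonneg s (by omega), Int.emod_lt_of_pos s (by omega)⟩
  have hc : 0 ≤ k % M ∧ k % M < M := ⟨Int.emod_nonneg k (by omega), Int.emod_lt_of_pos k (by omega)⟩
  rw [h1, pvEmod_sub_closed M _ _ hM hr hc, pvEmod_sub_closed M _ _ hM hc hr]
  split_ifs <;> omega

theorem pvCirc_bounds (M r c : Int) (hM : 1 ≤ M) (hr : 0 ≤ r ∧ r < M) (hc : 0 ≤ c ∧ c < M) :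
    0 ≤ pvCirc M r c ∧ 2 * pvCirc M r c ≤ M := by
  unfold pvCirc
  rw [pvEmod_sub_closed M _ _ hM hr hc, pvEmod_sub_closed M _ _ hM hc hr]
  split_ifs <;> omega

-- c achieves circular distance d from r iff c is one of the two residues r ∓ d (mod M)
theorem pvCirc_achiever (M r c d : Int) (hM : 1 ≤ M) (hr : 0 ≤ r ∧ r < M) (hc : 0 ≤ c ∧ c < M)
    (hd : 0 ≤ d ∧ 2 * d ≤ M) :
    pvCirc M r c = d ↔ (c = (r - d) % M ∨ c = (r + d) % M) := by
  have hd' : 0 ≤ d ∧ d < M := ⟨hd.1, by omega⟩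
  unfold pvCirc
  rw [pvEmod_sub_closed M _ _ hM hr hc, pvEmod_sub_closed M _ _ hM hc hr,
    pvEmod_sub_closed M _ _ hM hr hd', pvEmod_add_closed M _ _ hM hr hd']
  split_ifs <;> omega

-- characterisation of A's inner fold: final distance is the running min,
-- final index the first position achieving it (when it beats the initial bound)
theorem pvFold_snd (M s : Int) (l : List (Int × Int)) (b : Option Int × Int) :
    (l.foldl (pvStep M s) b).2 = l.foldl (fun d jk => min d (pvDist M s jk.2)) b.2 := by
  induction l generalizing b with
  | nil => rfl
  | cons jk l ih =>
    simp only [List.foldl_cons]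
    rw [ih]
    congr 1
    simp only [pvStep, pvDist]
    split_ifs <;> omega

-- fold of min: lower bound and attainment
theorem pvFoldMin_le (g : Int → Int) (l : List Int) (d0 : Int) :
    (l.foldl (fun d k => min d (g k)) d0) ≤ d0 ∧
    (∀ x ∈ l, (l.foldl (fun d k => min d (g k)) d0) ≤ g x) ∧
    ((l.foldl (fun d k => min d (g k)) d0) = d0 ∨ ∃ x ∈ l, g x = (l.foldl (fun d k => min d (g k)) d0)) := by
  induction l generalizing d0 with
  | nil => simp
  | cons x l ih =>
    simp only [List.foldl_cons]
    obtain ⟨h1, h2, h3⟩ := ih (min d0 (g x))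
    refine ⟨by omega, ?_, ?_⟩
    · intro y hy
      rcases List.mem_cons.mp hy with h | h
      · subst h; omega
      · exact h2 y h
    · rcases h3 with h | ⟨y, hy, hgy⟩
      · by_cases hc : d0 ≤ g x
        · left; omega
        · right; exact ⟨x, List.mem_cons_self .., by omega⟩
      · right; exact ⟨y, List.mem_cons_of_mem _ hy, hgy⟩

-- A never updates for M < 0 (every candidate distance is ≥ M)
theorem pvFold_snd_le (M s : Int) (l : List (Int × Int)) (b : Option Int × Int) :
    (l.foldl (pvStep M s) b).2 ≤ b.2 := by
  rw [pvFold_snd]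
  have h := (pvFoldMin_le (fun k => pvDist M s k) (l.map (·.2)) b.2).1
  rwa [List.foldl_map] at h

theorem pvFold_fst (M s : Int) (K : List Int) :
    ∀ (i0 : Int) (b : Option Int × Int),
    ((PySem.List.enumerate K i0).foldl (pvStep M s) b).1 =
      if ((PySem.List.enumerate K i0).foldl (pvStep M s) b).2 < b.2 then
        some (i0 + (K.findIdx (fun k => pvDist M s k == ((PySem.List.enumerate K i0).foldl (pvStep M s) b).2) : Int))
      else b.1 := by
  induction K with
  | nil => intro i0 b; simp [PySem.List.enumerate_nil]
  | cons k K ih =>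
    intro i0 b
    rw [PySem.List.enumerate_cons, List.foldl_cons]
    have hres_le := pvFold_snd_le M s (PySem.List.enumerate K (i0 + 1)) (pvStep M s b (i0, k))
    have ih' := ih (i0 + 1) (pvStep M s b (i0, k))
    by_cases h0 : pvDist M s k < b.2
    · have hb'eq : pvStep M s b (i0, k) = (some i0, pvDist M s k) := by
        simp only [pvStep]; rw [if_pos (by simpa [pvDist] using h0)]; rfl
      rw [hb'eq] at ih' hres_le ⊢
      by_cases h1 : ((PySem.List.enumerate K (i0 + 1)).foldl (pvStep M s) (some i0, pvDist M s k)).2 < pvDist M s k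
      · rw [ih', if_pos h1, if_pos (by omega), List.findIdx_cons]
        have hk : (pvDist M s k == ((PySem.List.enumerate K (i0 + 1)).foldl (pvStep M s) (some i0, pvDist M s k)).2) = false := by
          simp only [beq_eq_false_iff_ne, ne_eq]; omega
        rw [hk]
        simp only [cond_false]
        congr 1
        push_cast
        ring
      · have h2 : ((PySem.List.enumerate K (i0 + 1)).foldl (pvStep M s) (some i0, pvDist M s k)).2 = pvDist M s k := by omega
        rw [ih', if_neg (by omega), if_pos (by omega), List.findIdx_cons]
        have hk : (pvDist M s k == ((PySem.List.enumerate K (i0 + 1)).foldl (pvStep M s) (some i0, pvDist M s k)).2) = true := by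
          simp only [beq_iff_eq]; omega
        rw [hk]
        simp
    · have hb'eq : pvStep M s b (i0, k) = b := by
        simp only [pvStep]; rw [if_neg (by simpa [pvDist] using h0)]
      rw [hb'eq] at ih' hres_le ⊢
      by_cases h1 : ((PySem.List.enumerate K (i0 + 1)).foldl (pvStep M s) b).2 < b.2
      · rw [ih', if_pos h1, if_pos h1, List.findIdx_cons]
        have hk : (pvDist M s k == ((PySem.List.enumerate K (i0 + 1)).foldl (pvStep M s) b).2) = false := by
          simp only [beq_eq_false_iff_ne, ne_eq]; omega
        rw [hk]
        simp only [cond_false]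
        congr 1
        push_cast
        ring
      · rw [ih', if_neg h1, if_neg h1]

theorem pvF_neg (M s : Int) (hM : M < 0) (K : List Int) : pvF M K s = (none, M) := by
  unfold pvF
  generalize PySem.List.enumerate K = l
  induction l with
  | nil => rfl
  | cons jk l ih =>
    rw [List.foldl_cons, show pvStep M s (none, M) jk = (none, M) from ?_]
    · exact ih
    · have hb := PySem.Int.mod_neg_bounds (a := s - jk.2) hM
      simp only [pvStep]
      rw [if_neg (by omega)]

-- first_idx fold: lookup = first index of the residue
theorem pvContains_insert {ν : Type} (d : PySem.Dict Int ν) (k c : Int) (v : ν) :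
    (d.insert k v).contains c = (decide (c = k) || d.contains c) := by
  by_cases h : c = k
  · subst h
    rw [PySem.Dict.contains_eq_isSome_get?, PySem.Dict.get?_insert]
    simp
  · rw [PySem.Dict.contains_eq_isSome_get?, PySem.Dict.get?_insert, if_neg h,
      ← PySem.Dict.contains_eq_isSome_get?]
    simp [h]

theorem pvFirstIdx_get? (M : Int) (K : List Int) :
    ∀ (i0 : Int) (D : PySem.Dict Int Int) (c : Int),
    ((PySem.List.enumerate K i0).foldl
        (fun (d : PySem.Dict Int Int) jk =>
          let r := PySem.Int.mod jk.2 M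
          if d.contains r then d else d.insert r jk.1) D).get? c
    = if D.contains c then D.get? c
      else if c ∈ K.map (fun k => PySem.Int.mod k M) then
        some (i0 + ((K.map (fun k => PySem.Int.mod k M)).findIdx (fun x => x == c) : Int))
      else none := by
  induction K with
  | nil =>
    intro i0 D c
    by_cases hc : D.contains c
    · simp [PySem.List.enumerate_nil, hc]
    · simp only [PySem.List.enumerate_nil, List.foldl_nil, List.map_nil,
        List.not_mem_nil, if_false, hc]
      simp only [Bool.not_eq_true] at hc
      exact (PySem.Dict.get?_eq_none_iff_contains D c).mpr hc
  | cons k K ih =>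
    intro i0 D c
    rw [PySem.List.enumerate_cons, List.foldl_cons]
    simp only []
    by_cases hck : c = PySem.Int.mod k M
    · -- c is the head residue
      subst hck
      by_cases hD : D.contains (PySem.Int.mod k M)
      · rw [if_pos hD, ih, if_pos hD, if_pos hD]
      · rw [if_neg (by simpa using hD), ih]
        have hcont : (D.insert (PySem.Int.mod k M) i0).contains (PySem.Int.mod k M) = true := by
          rw [pvContains_insert]; simp
        rw [if_pos hcont, if_neg (by simpa using hD), PySem.Dict.get?_insert, if_pos rfl,
          List.map_cons, if_pos (by simp), List.findIdx_cons]
        simp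
    · -- c is a different key
      have hmem : c ∈ (k :: K).map (fun k => PySem.Int.mod k M) ↔
          c ∈ K.map (fun k => PySem.Int.mod k M) := by
        simp [List.map_cons, List.mem_cons, hck]
      by_cases hD : D.contains (PySem.Int.mod k M)
      · rw [if_pos hD, ih]
        by_cases hc : D.contains c
        · rw [if_pos hc, if_pos hc]
        · rw [if_neg hc, if_neg hc]
          by_cases hm : c ∈ K.map (fun k => PySem.Int.mod k M)
          · rw [if_pos hm, if_pos (hmem.mpr hm), List.map_cons, List.findIdx_cons]
            have : (PySem.Int.mod k M == c) = false := by
              simp [beq_eq_false_iff_ne]; exact fun h => hck h.symm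
            rw [this]
            simp only [cond_false]
            congr 1
            push_cast
            ring
          · rw [if_neg hm, if_neg (fun h => hm (hmem.mp h))]
      · rw [if_neg (by simpa using hD), ih]
        have hcont : (D.insert (PySem.Int.mod k M) i0).contains c = D.contains c := by
          rw [pvContains_insert]; simp [hck]
        rw [hcont]
        by_cases hc : D.contains c
        · rw [if_pos hc, if_pos hc, PySem.Dict.get?_insert, if_neg hck]
        · rw [if_neg hc, if_neg hc]
          by_cases hm : c ∈ K.map (fun k => PySem.Int.mod k M)
          · rw [if_pos hm, if_pos (hmem.mpr hm), List.map_cons, List.findIdx_cons]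
            have : (PySem.Int.mod k M == c) = false := by
              simp [beq_eq_false_iff_ne]; exact fun h => hck h.symm
            rw [this]
            simp only [cond_false]
            congr 1
            push_cast
            ring
          · rw [if_neg hm, if_neg (fun h => hm (hmem.mp h))]

theorem pvFirstIdx_keys (M : Int) (K : List Int) :
    ∀ (i0 : Int) (D : PySem.Dict Int Int),
    ((PySem.List.enumerate K i0).foldl
        (fun (d : PySem.Dict Int Int) jk =>
          let r := PySem.Int.mod jk.2 M
          if d.contains r then d else d.insert r jk.1) D).keys
    = PySem.Set.update D.keys (K.map (fun k => PySem.Int.mod k M)) := by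
  induction K with
  | nil => intro i0 D; simp [PySem.List.enumerate_nil, PySem.Set.update]
  | cons k K ih =>
    intro i0 D
    rw [PySem.List.enumerate_cons, List.foldl_cons, List.map_cons, PySem.Set.update_cons]
    simp only []
    by_cases hc : D.contains (PySem.Int.mod k M)
    · have hmem : PySem.Int.mod k M ∈ D.keys := (PySem.Dict.contains_iff_mem_keys D _).mp hc
      rw [if_pos hc, ih, PySem.Set.add_of_mem hmem]
    · have hmem : PySem.Int.mod k M ∉ D.keys :=
        fun h => (by simpa using hc : ¬ _) ((PySem.Dict.contains_iff_mem_keys D _).mpr h)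
      rw [if_neg (by simpa using hc), ih,
        PySem.Dict.keys_insert_of_not_contains D i0 (by simpa using hc),
        PySem.Set.add_of_not_mem hmem]

-- monotone access into a sorted list
theorem pvSorted_mono (rs : List Int) (h : rs.Pairwise (· ≤ ·)) :
    ∀ p q : Nat, p ≤ q → q < rs.length → rs.getD p 0 ≤ rs.getD q 0 := by
  intro p q hpq hq
  have hp : p < rs.length := by omega
  rw [List.getD_eq_getElem rs 0 hp, List.getD_eq_getElem rs 0 hq]
  rcases Nat.lt_or_ge p q with hlt | hge
  · exact List.pairwise_iff_getElem.mp h p q hp hq hlt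
  · have : p = q := by omega
    subst this; exact le_refl _

-- bisect correctness on a (≤)-sorted list
theorem pvBisect_correct (rs : List Int) (x : Int)
    (hs : rs.Pairwise (· ≤ ·)) :
    ∀ (lo hi : Nat), lo ≤ hi → hi ≤ rs.length →
    (∀ p, p < lo → rs.getD p 0 < x) → (∀ p, hi ≤ p → p < rs.length → x ≤ rs.getD p 0) →
    lo ≤ pvBisect rs x lo hi ∧ pvBisect rs x lo hi ≤ hi ∧
    (∀ p, p < pvBisect rs x lo hi → rs.getD p 0 < x) ∧
    (∀ p, pvBisect rs x lo hi ≤ p → p < rs.length → x ≤ rs.getD p 0) := by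
  intro lo hi
  induction hn : hi - lo using Nat.strong_induction_on generalizing lo hi with
  | _ n ih =>
    intro hlohi hhile hlt hge
    by_cases hcase : lo < hi
    · rw [pvBisect, dif_pos hcase]
      by_cases hmidlt : rs.getD ((lo + hi) / 2) 0 < x
      · rw [if_pos hmidlt]
        have hlt' : ∀ p, p < (lo + hi) / 2 + 1 → rs.getD p 0 < x := by
          intro p hp
          by_cases hplo : p < lo
          · exact hlt p hplo
          · exact lt_of_le_of_lt (pvSorted_mono rs hs p ((lo + hi) / 2) (by omega) (by omega)) hmidlt
        have h := ih (hi - ((lo + hi) / 2 + 1)) (by omega) ((lo + hi) / 2 + 1) hi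
          rfl (by omega) hhile hlt' hge
        exact ⟨by omega, h.2.1, h.2.2.1, h.2.2.2⟩
      · rw [if_neg hmidlt]
        have hge' : ∀ p, (lo + hi) / 2 ≤ p → p < rs.length → x ≤ rs.getD p 0 := by
          intro p hp hpl
          by_cases hphi : hi ≤ p
          · exact hge p hphi hpl
          · exact le_trans (not_lt.mp hmidlt) (pvSorted_mono rs hs ((lo + hi) / 2) p hp hpl)
        have h := ih ((lo + hi) / 2 - lo) (by omega) lo ((lo + hi) / 2)
          rfl (by omega) (by omega) hlt hge'
        exact ⟨h.1, by omega, h.2.2.1, h.2.2.2⟩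
    · rw [pvBisect, dif_neg hcase]
      exact ⟨le_refl _, by omega, hlt, fun p hp hpl => hge p (by omega) hpl⟩

-- the index expressions (i-1) % n and i % n of the port, in closed form
theorem pvNegOneEmod (n : Int) (hn : 1 ≤ n) : (-1 : Int) % n = n - 1 := by
  have h1 : ((-1 : Int) + n * 1) % n = (-1 : Int) % n := Int.add_mul_emod_self_left (-1) n 1
  rw [← h1, show (-1 : Int) + n * 1 = n - 1 by ring]
  apply Int.emod_eq_of_lt <;> omega

-- the two cyclic neighbours minimise pvCirc over a strictly sorted residue list
theorem pvNeighbor_min (M r : Int) (rs : List Int) (hM : 1 ≤ M)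
    (hsorted : rs.Pairwise (· < ·)) (hbnd : ∀ c ∈ rs, 0 ≤ c ∧ c < M) (hr : 0 ≤ r ∧ r < M)
    (hn : rs ≠ []) (i : Nat) (hi : i ≤ rs.length)
    (hlt : ∀ p, p < i → rs.getD p 0 < r) (hge : ∀ p, i ≤ p → p < rs.length → r ≤ rs.getD p 0) :
    ∀ c ∈ rs,
      min (pvCirc M r (rs.getD (PySem.Int.mod ((i : Int) - 1) (rs.length : Int)).toNat 0))
          (pvCirc M r (rs.getD (PySem.Int.mod (i : Int) (rs.length : Int)).toNat 0))
        ≤ pvCirc M r c := by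
  have hnlen : 1 ≤ rs.length := by
    cases rs with
    | nil => exact absurd rfl hn
    | cons a l => simp
  have hmono := pvSorted_mono rs (hsorted.imp le_of_lt)
  rw [PySem.Int.mod_eq_emod_of_pos (b := (rs.length : Int)) (by exact_mod_cast hnlen),
    PySem.Int.mod_eq_emod_of_pos (b := (rs.length : Int)) (by exact_mod_cast hnlen)]
  intro c hc
  obtain ⟨p, hp, rfl⟩ := List.mem_iff_getElem.mp hc
  rw [← List.getD_eq_getElem rs 0 hp]
  -- closed forms for the two cyclic indices
  have hidx : ((((i : Int) - 1) % (rs.length : Int)).toNat = if i = 0 then rs.length - 1 else i - 1)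
      ∧ (((i : Int) % (rs.length : Int)).toNat = if i = rs.length then 0 else i) := by
    constructor
    · by_cases h0 : i = 0
      · subst h0
        rw [if_pos rfl, show ((0 : Nat) : Int) - 1 = -1 by ring, pvNegOneEmod _ (by exact_mod_cast hnlen)]
        omega
      · rw [if_neg h0, Int.emod_eq_of_lt (by omega) (by exact_mod_cast (by omega : (i : Int) - 1 < (rs.length : Int)))]
        omega
    · by_cases h0 : i = rs.length
      · subst h0; simp
      · rw [if_neg h0, Int.emod_eq_of_lt (by omega) (by exact_mod_cast (by omega : (i : Int) < (rs.length : Int)))]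
        omega
  rw [hidx.1, hidx.2]
  -- bounds for the accessed elements
  have hgetmem : ∀ q : Nat, q < rs.length → rs.getD q 0 ∈ rs := by
    intro q hq; rw [List.getD_eq_getElem rs 0 hq]; exact List.getElem_mem hq
  have hbc := hbnd _ (hgetmem p hp)
  by_cases hcase : 0 < i ∧ i < rs.length
  · -- interior: pred = rs[i-1] < r ≤ rs[i] = succ
    rw [if_neg (by omega), if_neg (by omega)]
    have hbp := hbnd _ (hgetmem (i - 1) (by omega))
    have hbs := hbnd _ (hgetmem i (by omega))
    have h1 : rs.getD (i - 1) 0 < r := hlt _ (by omega)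
    have h2 : r ≤ rs.getD i 0 := hge _ (by omega) (by omega)
    have h3 : rs.getD p 0 ≤ rs.getD (i - 1) 0 ∨ rs.getD i 0 ≤ rs.getD p 0 := by
      by_cases hpi : p ≤ i - 1
      · exact Or.inl (hmono p (i - 1) hpi (by omega))
      · exact Or.inr (hmono i p (by omega) hp)
    unfold pvCirc
    rw [pvEmod_sub_closed M r _ hM hr hbp, pvEmod_sub_closed M _ r hM hbp hr,
      pvEmod_sub_closed M r _ hM hr hbs, pvEmod_sub_closed M _ r hM hbs hr,
      pvEmod_sub_closed M r _ hM hr hbc, pvEmod_sub_closed M _ r hM hbc hr]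
    split_ifs <;> omega
  · -- boundary: pred = last, succ = first, and all of rs is on one side of r
    have hone : (∀ q, q < rs.length → rs.getD q 0 < r) ∨ (∀ q, q < rs.length → r ≤ rs.getD q 0) := by
      by_cases h0 : i = 0
      · exact Or.inr (fun q hq => hge q (by omega) hq)
      · exact Or.inl (fun q hq => hlt q (by omega))
    have hpi : (if i = 0 then rs.length - 1 else i - 1) = rs.length - 1 := by
      by_cases h0 : i = 0 <;> simp [h0] <;> omega
    have hsi : (if i = rs.length then 0 else i) = 0 := by
      by_cases h0 : i = rs.length <;> simp [h0] <;> omega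
    rw [hpi, hsi]
    have hbp := hbnd _ (hgetmem (rs.length - 1) (by omega))
    have hbs := hbnd _ (hgetmem 0 (by omega))
    have h3 : rs.getD 0 0 ≤ rs.getD p 0 := hmono 0 p (by omega) hp
    have h4 : rs.getD p 0 ≤ rs.getD (rs.length - 1) 0 := hmono p (rs.length - 1) (by omega) (by omega)
    unfold pvCirc
    rw [pvEmod_sub_closed M r _ hM hr hbp, pvEmod_sub_closed M _ r hM hbp hr,
      pvEmod_sub_closed M r _ hM hr hbs, pvEmod_sub_closed M _ r hM hbs hr,
      pvEmod_sub_closed M r _ hM hr hbc, pvEmod_sub_closed M _ r hM hbc hr]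
    rcases hone with hall | hall
    · have ha1 := hall (rs.length - 1) (by omega)
      have ha2 := hall 0 (by omega)
      have ha3 := hall p hp
      split_ifs <;> omega
    · have ha1 := hall (rs.length - 1) (by omega)
      have ha2 := hall 0 (by omega)
      have ha3 := hall p hp
      split_ifs <;> omega

-- findIdx over a disjunction of equalities splits as a min
theorem pvFindIdx_or (R : List Int) (lo hi : Int) :
    (R.findIdx (fun c => c == lo || c == hi))
      = min (R.findIdx (fun c => c == lo)) (R.findIdx (fun c => c == hi)) := by
  induction R with
  | nil => simp
  | cons c R ih =>
    rw [List.findIdx_cons, List.findIdx_cons, List.findIdx_cons]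
    by_cases h1 : c = lo
    · simp [h1]
    · by_cases h2 : c = hi
      · simp [h1, h2]
      · have hb1 : (c == lo) = false := by simp [h1]
        have hb2 : (c == hi) = false := by simp [h2]
        rw [hb1, hb2]
        simp only [Bool.or_false, cond_false]
        rw [ih]
        omega

theorem pvFindIdx_congr {α : Type} (l : List α) (p q : α → Bool)
    (h : ∀ x ∈ l, p x = q x) : l.findIdx p = l.findIdx q := by
  induction l with
  | nil => rfl
  | cons a l ih =>
    rw [List.findIdx_cons, List.findIdx_cons, h a (List.mem_cons_self ..),
      ih (fun x hx => h x (List.mem_cons_of_mem _ hx))]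

-- the per-state values agree (M ≥ 1, K ≠ [])
theorem pvPointwise (M : Int) (K : List Int) (s : Int) (hM : 1 ≤ M) (hK : K ≠ []) :
    ([("j", (pvF M K s).1), ("distance", some (pvF M K s).2)] : List (String × Option Int))
    = (let first_idx : PySem.Dict Int Int :=
        (PySem.List.enumerate K).foldl
          (fun (d : PySem.Dict Int Int) jk =>
            let r := PySem.Int.mod jk.2 M
            if d.contains r then d else d.insert r jk.1) PySem.Dict.empty
       let rs := PySem.List.sorted first_idx.keys (fun c => c) false
       let n := rs.length
       let r := PySem.Int.mod s M
       let i := pvBisect rs r 0 n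
       let pred := rs.getD (PySem.Int.mod ((i : Int) - 1) (n : Int)).toNat 0
       let succ := rs.getD (PySem.Int.mod (i : Int) (n : Int)).toNat 0
       let d := min (min (PySem.Int.mod (r - pred) M) (PySem.Int.mod (pred - r) M))
                    (min (PySem.Int.mod (r - succ) M) (PySem.Int.mod (succ - r) M))
       let j := min (first_idx.getD (PySem.Int.mod (r - d) M) (K.length : Int))
                    (first_idx.getD (PySem.Int.mod (r + d) M) (K.length : Int))
       [("j", some j), ("distance", some d)]) := by 
  have hM0 : (0 : Int) < M := by omega
  have hmod : ∀ x : Int, PySem.Int.mod x M = x % M := fun x => PySem.Int.mod_eq_emod_of_pos hM0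
  dsimp only
  set D := (PySem.List.enumerate K).foldl
      (fun (d : PySem.Dict Int Int) jk =>
        let r := PySem.Int.mod jk.2 M
        if d.contains r then d else d.insert r jk.1) PySem.Dict.empty with hD
  set R := K.map (fun k => PySem.Int.mod k M) with hR
  have hDget : ∀ c, D.get? c = if c ∈ R then some ((R.findIdx (fun x => x == c) : Int)) else none := by
    intro c
    rw [hD, pvFirstIdx_get? M K 0 PySem.Dict.empty c, if_neg (by simp [PySem.Dict.contains_empty])]
    by_cases hm : c ∈ R
    · rw [if_pos hm, if_pos hm, zero_add]
    · rw [if_neg hm, if_neg hm]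
  have hDgetD : ∀ c, D.getD c (K.length : Int) = ((R.findIdx (fun x => x == c)) : Int) := by
    intro c
    rw [PySem.Dict.getD_eq_get?_getD, hDget c]
    by_cases hm : c ∈ R
    · rw [if_pos hm]; rfl
    · rw [if_neg hm]
      have hlen : R.findIdx (fun x => x == c) = R.length :=
        List.findIdx_eq_length.mpr (fun x hx => by simp [beq_eq_false_iff_ne]; exact fun h => hm (h ▸ hx))
      simp only [Option.getD_none]
      rw [show List.findIdx (fun x => x == c) (List.map (fun k => PySem.Int.mod k M) K)
            = List.findIdx (fun x => x == c) R from rfl, hlen, hR, List.length_map]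
  have hkeys : D.keys = PySem.Set.ofList R := by
    rw [hD, pvFirstIdx_keys M K 0 PySem.Dict.empty, PySem.Dict.keys_empty, PySem.Set.update_nil_left, hR]
  set rs := PySem.List.sorted D.keys (fun c => c) false with hrs
  have hpair : rs.Pairwise (· < ·) := by rw [hrs, hkeys]; exact PySem.List.sorted_ofList_pairwise_lt R
  have hmemrs : ∀ c, c ∈ rs ↔ c ∈ R := by
    intro c; rw [hrs, PySem.List.mem_sorted, hkeys, PySem.Set.mem_ofList]
  have hRne : R ≠ [] := by rw [hR]; simpa [List.map_eq_nil_iff] using hK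
  have hrsne : rs ≠ [] := by
    obtain ⟨c, hc⟩ := List.exists_mem_of_ne_nil R hRne
    exact List.ne_nil_of_mem ((hmemrs c).mpr hc)
  have hbnd : ∀ c ∈ rs, 0 ≤ c ∧ c < M := by
    intro c hc
    obtain ⟨k, _, rfl⟩ := List.mem_map.mp ((hmemrs c).mp hc)
    exact ⟨PySem.Int.mod_nonneg k hM0, PySem.Int.mod_lt k hM0⟩
  have hnlen : 1 ≤ rs.length := by
    cases h : rs with
    | nil => exact absurd h hrsne
    | cons a l => simp
  set r := PySem.Int.mod s M with hr'
  have hrb : 0 ≤ r ∧ r < M := ⟨PySem.Int.mod_nonneg s hM0, PySem.Int.mod_lt s hM0⟩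
  set i := pvBisect rs r 0 rs.length with hi'
  have hbis := pvBisect_correct rs r (hpair.imp le_of_lt) 0 rs.length (by omega) (le_refl _)
    (by intro p hp; omega) (by intro p h1 h2; omega)
  set pred := rs.getD (PySem.Int.mod ((i : Int) - 1) ((rs.length : Nat) : Int)).toNat 0 with hpred
  set succ := rs.getD (PySem.Int.mod (i : Int) ((rs.length : Nat) : Int)).toNat 0 with hsucc
  have hneigh := pvNeighbor_min M r rs (by omega) hpair hbnd hrb hrsne i hbis.2.1
    hbis.2.2.1 hbis.2.2.2
  have hmodn : ∀ x : Int, PySem.Int.mod x ((rs.length : Nat) : Int) = x % ((rs.length : Nat) : Int) :=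
    fun x => PySem.Int.mod_eq_emod_of_pos (by exact_mod_cast hnlen)
  have hpredmem : pred ∈ rs := by
    rw [hpred, hmodn]
    have h2 : ((i : Int) - 1) % (rs.length : Int) < (rs.length : Int) :=
      Int.emod_lt_of_pos _ (by exact_mod_cast hnlen)
    have h1 : 0 ≤ ((i : Int) - 1) % (rs.length : Int) :=
      Int.emod_nonneg _ (by exact_mod_cast (by omega : rs.length ≠ 0))
    have h3 : ((((i : Int) - 1) % (rs.length : Int)).toNat) < rs.length := by omega
    rw [List.getD_eq_getElem rs 0 h3]
    exact List.getElem_mem h3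
  have hsuccmem : succ ∈ rs := by
    rw [hsucc, hmodn]
    have h2 : (i : Int) % (rs.length : Int) < (rs.length : Int) :=
      Int.emod_lt_of_pos _ (by exact_mod_cast hnlen)
    have h1 : 0 ≤ (i : Int) % (rs.length : Int) :=
      Int.emod_nonneg _ (by exact_mod_cast (by omega : rs.length ≠ 0))
    have h3 : (((i : Int) % (rs.length : Int)).toNat) < rs.length := by omega
    rw [List.getD_eq_getElem rs 0 h3]
    exact List.getElem_mem h3
  -- A's running minimum
  have hsnd : (pvF M K s).2 = K.foldl (fun d k => min d (pvDist M s k)) M := by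
    unfold pvF
    rw [pvFold_snd M s (PySem.List.enumerate K) (none, M)]
    calc ((PySem.List.enumerate K).foldl (fun d jk => min d (pvDist M s jk.2)) ((none : Option Int), M).2)
        = (((PySem.List.enumerate K).map (fun x => x.2)).foldl (fun d k => min d (pvDist M s k)) M) := by
          rw [List.foldl_map]
      _ = K.foldl (fun d k => min d (pvDist M s k)) M := by
          rw [PySem.List.map_snd_enumerate]
  set dmin := K.foldl (fun d k => min d (pvDist M s k)) M with hdmin
  have hfold := pvFoldMin_le (pvDist M s) K M
  have hdistcirc : ∀ k : Int, pvDist M s k = pvCirc M r (PySem.Int.mod k M) := by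
    intro k
    rw [hr', hmod, hmod]
    unfold pvDist
    exact pvDist_eq_circ M s k (by omega)
  have hdistlt : ∀ k ∈ K, pvDist M s k < M := by
    intro k _
    have h1 := PySem.Int.mod_nonneg (s - k) hM0
    have h2 := PySem.Int.mod_lt (s - k) hM0
    unfold pvDist
    omega
  obtain ⟨k1, hk1⟩ : ∃ k, k ∈ K := by
    cases K with
    | nil => exact absurd rfl hK
    | cons a l => exact ⟨a, List.mem_cons_self ..⟩
  have hdminlt : dmin < M := lt_of_le_of_lt (hfold.2.1 k1 hk1) (hdistlt k1 hk1)
  have hattain : ∃ k0 ∈ K, pvDist M s k0 = dmin := by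
    rcases hfold.2.2 with h | h
    · omega
    · exact h
  -- dmin equals B's neighbour distance
  have hle1 : dmin ≤ pvCirc M r pred := by
    obtain ⟨k, hk, hkeq⟩ := List.mem_map.mp ((hmemrs pred).mp hpredmem)
    rw [← hkeq, ← hdistcirc k]
    exact hfold.2.1 k hk
  have hle2 : dmin ≤ pvCirc M r succ := by
    obtain ⟨k, hk, hkeq⟩ := List.mem_map.mp ((hmemrs succ).mp hsuccmem)
    rw [← hkeq, ← hdistcirc k]
    exact hfold.2.1 k hk
  have hge' : min (pvCirc M r pred) (pvCirc M r succ) ≤ dmin := by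
    obtain ⟨k0, hk0, hk0eq⟩ := hattain
    have hc0 : PySem.Int.mod k0 M ∈ rs := (hmemrs _).mpr (List.mem_map.mpr ⟨k0, hk0, rfl⟩)
    have := hneigh _ hc0
    rw [← hdistcirc k0, hk0eq] at this
    exact this
  have hdmin_dB : dmin = min (pvCirc M r pred) (pvCirc M r succ) := by omega
  have h2d : 0 ≤ dmin ∧ 2 * dmin ≤ M := by
    have hb1 := pvCirc_bounds M r pred (by omega) hrb (hbnd _ hpredmem)
    have hb2 := pvCirc_bounds M r succ (by omega) hrb (hbnd _ hsuccmem)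
    omega
  -- the goal's distance expression
  have hgoalD : min (min (PySem.Int.mod (r - pred) M) (PySem.Int.mod (pred - r) M))
      (min (PySem.Int.mod (r - succ) M) (PySem.Int.mod (succ - r) M))
      = min (pvCirc M r pred) (pvCirc M r succ) := by
    simp only [hmod, pvCirc]
  -- A's first component
  have hfst : (pvF M K s).1 = some ((K.findIdx (fun k => pvDist M s k == dmin) : Int)) := by
    have h := pvFold_fst M s K 0 ((none : Option Int), M)
    unfold pvF
    unfold pvF at hsnd
    rw [show ((none : Option Int), M).2 = M from rfl] at h
    rw [hsnd] at h
    rw [h, if_pos hdminlt]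
    simp
  rw [hgoalD, ← hdmin_dB, hfst, hsnd]
  -- components
  simp only [List.cons.injEq, Prod.mk.injEq, and_true, true_and]
  -- the index component
  rw [hmod (r - dmin), hmod (r + dmin), hDgetD, hDgetD, ← Nat.cast_min, ← pvFindIdx_or, hR,
    List.findIdx_map]
  congr 2
  apply pvFindIdx_congr
  intro k _
  have hach := pvCirc_achiever M r (PySem.Int.mod k M) dmin (by omega) hrb
    ⟨PySem.Int.mod_nonneg k hM0, PySem.Int.mod_lt k hM0⟩ h2d
  rw [Bool.eq_iff_iff]
  simp only [Function.comp_apply, Bool.or_eq_true, beq_iff_eq, hmod, hdistcirc k]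
  rw [hmod] at hach
  exact hach

-- A's outer loop: lookup after a fold of inserts with a deterministic value function
theorem pv_get?_foldl_insert {α : Type} (W : Int → α) (states : List Int) :
    ∀ (d : PySem.Dict Int α) (k : Int),
    (states.foldl (fun r s => r.insert s (W s)) d).get? k
    = if k ∈ states then some (W k) else d.get? k := by
  induction states with
  | nil => intro d k; simp
  | cons s rest ih =>
    intro d k
    simp only [List.foldl_cons]
    rw [ih]
    by_cases hr : k ∈ rest
    · simp [hr]
    · by_cases hs : k = s
      · simp [hs]
      · simp [hr, hs, PySem.Dict.get?_insert]

-- A's outer loop builds exactly the dedup'd key list paired with the value function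
theorem pv_items_insert_fold {α : Type} (W : Int → α) (w0 : α) (states : List Int) :
    (states.foldl (fun (r : PySem.Dict Int α) s => r.insert s (W s)) PySem.Dict.empty).items
    = (PySem.Set.ofList states).map (fun k => (k, W k)) := by
  have hnd : (states.foldl (fun (r : PySem.Dict Int α) s => r.insert s (W s)) PySem.Dict.empty).keys.Nodup :=
    PySem.Dict.nodup_keys_foldl_insert states (fun _ s => W s) PySem.Dict.empty (by simp)
  have hkeys : (states.foldl (fun (r : PySem.Dict Int α) s => r.insert s (W s)) PySem.Dict.empty).keys
      = PySem.Set.ofList states := by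
    rw [PySem.Dict.keys_foldl_insert]
    simp [PySem.Set.update_nil_left]
  rw [PySem.Dict.items_eq_map_keys _ hnd w0, hkeys]
  apply List.map_congr_left
  intro k hk
  have hk' : k ∈ states := (PySem.Set.mem_ofList _ _).mp hk
  rw [PySem.Dict.getD_eq_get?_getD, pv_get?_foldl_insert W states PySem.Dict.empty k, if_pos hk']
  rfl

-- B's guarded outer loop: lookup (value function version)
theorem pv_get?_foldl_guard {α : Type} (V : Int → α) (states : List Int) :
    ∀ (d : PySem.Dict Int α) (k : Int),
    (states.foldl (fun r s => if r.contains s then r else r.insert s (V s)) d).get? k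
    = if d.contains k then d.get? k else if k ∈ states then some (V k) else none := by
  induction states with
  | nil =>
    intro d k
    by_cases hc : d.contains k
    · simp [hc]
    · simp only [List.foldl_nil, List.not_mem_nil, if_false, hc]
      simp only [Bool.not_eq_true] at hc
      exact (PySem.Dict.get?_eq_none_iff_contains d k).mpr hc
  | cons s rest ih =>
    intro d k
    rw [List.foldl_cons]
    by_cases hks : k = s
    · subst hks
      by_cases hd : d.contains k
      · rw [if_pos hd, ih, if_pos hd, if_pos hd]
      · rw [if_neg (by simpa using hd), ih]
        have hcont : (d.insert k (V k)).contains k = true := by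
          rw [pvContains_insert]; simp
        rw [if_pos hcont, if_neg (by simpa using hd), PySem.Dict.get?_insert, if_pos rfl,
          if_pos (List.mem_cons_self ..)]
    · have hmem : k ∈ s :: rest ↔ k ∈ rest := by simp [List.mem_cons, hks]
      by_cases hd : d.contains s
      · rw [if_pos hd, ih]
        by_cases hk : d.contains k
        · rw [if_pos hk, if_pos hk]
        · rw [if_neg hk, if_neg hk]
          by_cases hm : k ∈ rest
          · rw [if_pos hm, if_pos (hmem.mpr hm)]
          · rw [if_neg hm, if_neg (fun h => hm (hmem.mp h))]
      · rw [if_neg (by simpa using hd), ih]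
        have hcont : (d.insert s (V s)).contains k = d.contains k := by
          rw [pvContains_insert]; simp [hks]
        rw [hcont]
        by_cases hk : d.contains k
        · rw [if_pos hk, if_pos hk, PySem.Dict.get?_insert, if_neg hks]
        · rw [if_neg hk, if_neg hk]
          by_cases hm : k ∈ rest
          · rw [if_pos hm, if_pos (hmem.mpr hm)]
          · rw [if_neg hm, if_neg (fun h => hm (hmem.mp h))]

theorem pv_keys_foldl_guard {α : Type} (V : Int → α) (states : List Int) :
    ∀ (d : PySem.Dict Int α),
    (states.foldl (fun r s => if r.contains s then r else r.insert s (V s)) d).keys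
    = PySem.Set.update d.keys states := by
  induction states with
  | nil => intro d; simp [PySem.Set.update]
  | cons s rest ih =>
    intro d
    rw [List.foldl_cons, PySem.Set.update_cons]
    by_cases hc : d.contains s
    · have hmem : s ∈ d.keys := (PySem.Dict.contains_iff_mem_keys d _).mp hc
      rw [if_pos hc, ih, PySem.Set.add_of_mem hmem]
    · have hmem : s ∉ d.keys :=
        fun h => (by simpa using hc : ¬ _) ((PySem.Dict.contains_iff_mem_keys d _).mpr h)
      rw [if_neg (by simpa using hc), ih,
        PySem.Dict.keys_insert_of_not_contains d (V s) (by simpa using hc),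
        PySem.Set.add_of_not_mem hmem]

theorem pv_nodup_foldl_guard {α : Type} (V : Int → α) (states : List Int) :
    ∀ (d : PySem.Dict Int α), d.keys.Nodup →
    (states.foldl (fun r s => if r.contains s then r else r.insert s (V s)) d).keys.Nodup := by
  induction states with
  | nil => intro d h; exact h
  | cons s rest ih =>
    intro d h
    rw [List.foldl_cons]
    by_cases hc : d.contains s
    · rw [if_pos hc]; exact ih _ h
    · rw [if_neg (by simpa using hc)]
      exact ih _ (PySem.Dict.nodup_keys_insert _ _ _ h)

theorem pv_items_guard_fold {α : Type} (V : Int → α) (w0 : α) (states : List Int) :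
    (states.foldl (fun (r : PySem.Dict Int α) s => if r.contains s then r else r.insert s (V s)) PySem.Dict.empty).items
    = (PySem.Set.ofList states).map (fun k => (k, V k)) := by
  have hnd := pv_nodup_foldl_guard V states PySem.Dict.empty (by simp)
  have hkeys := pv_keys_foldl_guard V states PySem.Dict.empty
  rw [PySem.Dict.keys_empty, PySem.Set.update_nil_left] at hkeys
  rw [PySem.Dict.items_eq_map_keys _ hnd w0, hkeys]
  apply List.map_congr_left
  intro k hk
  have hk' : k ∈ states := (PySem.Set.mem_ofList _ _).mp hk
  rw [PySem.Dict.getD_eq_get?_getD, pv_get?_foldl_guard V states PySem.Dict.empty k]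
  simp [hk']

-- ===== VERDICT (by name: the statement is the Claim_ definition above) =====
theorem compute_min_distances_spec : Claim_equal_compute_min_distances := by
  intro states K_mod M hDom hPre
  unfold Spec_compute_min_distances compute_min_distances compute_min_distances_alt
  show (states.foldl (fun (results : PySem.Dict Int (List (String × Option Int))) s =>
      results.insert s [("j", (pvF M K_mod s).1), ("distance", some (pvF M K_mod s).2)])
      PySem.Dict.empty).items = _
  rw [pv_items_insert_fold (fun s => [("j", (pvF M K_mod s).1), ("distance", some (pvF M K_mod s).2)]) [] states]
  by_cases hM : 1 ≤ M
  · by_cases hKe : K_mod = []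
    · rw [if_pos (Or.inl hKe)]
      rw [pv_items_insert_fold (fun _ => [("j", (none : Option Int)), ("distance", some M)]) [] states]
      apply List.map_congr_left
      intro s _
      have hpvF : pvF M K_mod s = (none, M) := by
        subst hKe; simp [pvF, PySem.List.enumerate_nil]
      rw [hpvF]
    · rw [if_neg (by intro h; rcases h with h | h; exact hKe h; omega)]
      dsimp only
      rw [pv_items_guard_fold _ [] states]
      apply List.map_congr_left
      intro s _
      exact congrArg (fun v => (s, v)) (pvPointwise M K_mod s hM hKe)
  · rw [if_pos (Or.inr (by omega))]
    rw [pv_items_insert_fold (fun _ => [("j", (none : Option Int)), ("distance", some M)]) [] states]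
    apply List.map_congr_left
    intro s hs
    have hpvF : pvF M K_mod s = (none, M) := by
      rcases lt_or_eq_of_le (by omega : M ≤ 0) with hlt | heq
      · exact pvF_neg M s hlt K_mod
      · unfold Pre_compute_min_distances at hPre
        rcases hPre with h | h | h
        · omega
        · subst h; exact absurd ((PySem.Set.mem_ofList _ _).mp hs) (List.not_mem_nil)
        · subst h; simp [pvF, PySem.List.enumerate_nil]
    rw [hpvF]
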